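-- pv_equiv track=rewrite | github.com/godawgs87/optionsbot | Options_Scanner/backtesting/performance_metrics.py | max_consecutive_count
-- ===== SOURCE A (Python) =====
-- from typing import Dict, List, Any, Optional
--
-- def max_consecutive_count(results: List[int], value: int) -> int:
--     """
--     Calculate maximum consecutive occurrences of a value in a list.
--
--     Args:
--         results: List of binary values (0 or 1)
--         value: Value to count consecutive occurrences of
--
--     Returns:
--         Maximum number of consecutive occurrences
--     """
--     max_count = 0
--     current_count = 0
--
--     for result in results:
--         if result == value:
--             current_count += 1
--             max_count = max(max_count, current_count)
--         else:
--             current_count = 0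
--
--     return max_count
-- ===== SOURCE B (Python) =====
-- from typing import List
--
-- def max_consecutive_count(results: List[int], value: int) -> int:
--     """Max consecutive occurrences of value, via separator indices.
--
--     Pass 1 collects the indices where the element differs from value,
--     bracketed by sentinels -1 and len(results); pass 2 takes the largest
--     gap between consecutive separators (gap = run length of value there).
--     """
--     seps = [-1] + [i for i, x in enumerate(results) if x != value] + [len(results)]
--     return max(b - a - 1 for a, b in zip(seps, seps[1:]))
-- ===== Notes on version B (the rewrite author's own statement) =====
-- stated objective: alternative
-- what changed: Replaces the running-counter-with-best-so-far scan by two staged passes: collect the indices of non-value elements bracketed by sentinels -1 and len(results), then take the largest gap between consecutive separator indices minus one.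
import Mathlib
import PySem

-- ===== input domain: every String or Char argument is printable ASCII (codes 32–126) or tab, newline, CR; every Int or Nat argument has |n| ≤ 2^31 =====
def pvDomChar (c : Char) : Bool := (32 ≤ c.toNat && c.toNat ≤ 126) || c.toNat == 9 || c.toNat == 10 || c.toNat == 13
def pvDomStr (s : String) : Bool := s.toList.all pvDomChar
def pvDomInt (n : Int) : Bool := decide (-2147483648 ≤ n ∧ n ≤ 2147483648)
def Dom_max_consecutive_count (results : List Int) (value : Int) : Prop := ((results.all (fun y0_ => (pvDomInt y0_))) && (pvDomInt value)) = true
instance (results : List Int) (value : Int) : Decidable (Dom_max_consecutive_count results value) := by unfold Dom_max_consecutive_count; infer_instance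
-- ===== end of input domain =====

-- B replaces A's running-counter scan by two staged passes: collect the indices of
-- non-value elements bracketed by sentinels -1 and len(results), then take the
-- largest gap between consecutive separator indices minus one.

-- ===== PORT A =====
-- the loop body: result == value → bump current, best = max(best, current); else reset current
def max_consecutive_count (results : List Int) (value : Int) : Int :=
  (results.foldl
    (fun (st : Int × Int) result =>
      if result = value then (max st.1 (st.2 + 1), st.2 + 1) else (st.1, 0))
    (0, 0)).1

-- ===== PORT B =====
-- seps = [-1] + [i for i, x in enumerate(results) if x != value] + [len(results)]
-- return max(b - a - 1 for a, b in zip(seps, seps[1:]))   (seps[1:] = tail; the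
-- generator is never empty since seps always has ≥ 2 elements, so the [] branch
-- of the match is unreachable)
def max_consecutive_count_alt (results : List Int) (value : Int) : Int :=
  let seps : List Int :=
    (-1) :: ((PySem.List.enumerate results).filterMap
        (fun p => if p.2 ≠ value then some p.1 else none)
      ++ [(results.length : Int)])
  match (seps.zip seps.tail).map (fun ab => ab.2 - ab.1 - 1) with
  | [] => 0
  | d :: t => t.foldl max d

-- ===== PRECONDITION & SPEC =====
def Spec_max_consecutive_count (results : List Int) (value : Int) (out : Int) : Prop := out = max_consecutive_count_alt results value
instance (results : List Int) (value : Int) (out : Int) : Decidable (Spec_max_consecutive_count results value out) := by unfold Spec_max_consecutive_count; infer_instance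

-- ===== CLAIM (what is proved, stated in full; the proofs are below) =====
def Claim_equal_max_consecutive_count : Prop := ∀ (results : List Int) (value : Int), Dom_max_consecutive_count results value → Spec_max_consecutive_count results value (max_consecutive_count results value)

-- ===== LEMMAS AND PROOFS =====

-- A's loop as a named fold
def loopA (value : Int) (l : List Int) (st : Int × Int) : Int × Int :=
  l.foldl
    (fun (st : Int × Int) result =>
      if result = value then (max st.1 (st.2 + 1), st.2 + 1) else (st.1, 0))
    st

-- reference function: best run length given a current run of length c already open
def G (value c : Int) : List Int → Int
  | [] => c
  | x :: xs => if x = value then G value (c + 1) xs else max c (G value 0 xs)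

-- the separator indices of B, with an explicit enumerate start
def sepI (value s : Int) (xs : List Int) : List Int :=
  (PySem.List.enumerate xs s).filterMap (fun p => if p.2 ≠ value then some p.1 else none)

-- max gap minus one between consecutive elements of a :: t
def dm (a : Int) : List Int → Int
  | [] => 0
  | [b] => b - a - 1
  | b :: c :: rest => max (b - a - 1) (dm b (c :: rest))

theorem G_ge (value : Int) (l : List Int) : ∀ c, c ≤ G value c l := by
  induction l with
  | nil => intro c; simp [G]
  | cons x xs ih =>
    intro c
    by_cases hx : x = value
    · simp only [G, if_pos hx]
      exact le_trans (by omega) (ih (c + 1))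
    · simp only [G, if_neg hx]
      exact le_max_left _ _

theorem loopA_cons (value x : Int) (l : List Int) (st : Int × Int) :
    loopA value (x :: l) st =
      loopA value l (if x = value then (max st.1 (st.2 + 1), st.2 + 1) else (st.1, 0)) := by
  simp only [loopA, List.foldl_cons]

theorem loopA_eq_G (value : Int) (l : List Int) :
    ∀ m c, 0 ≤ c → c ≤ m → (loopA value l (m, c)).1 = max m (G value c l) := by
  induction l with
  | nil => intro m c _ h; simp [loopA, G, max_eq_left h]
  | cons x xs ih =>
    intro m c hc h
    rw [loopA_cons]
    by_cases hx : x = value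
    · rw [if_pos hx, ih (max m (c + 1)) (c + 1) (by omega) (le_max_right _ _)]
      have hge := G_ge value xs (c + 1)
      simp only [G]
      rw [if_pos hx, max_assoc, max_eq_right hge]
    · rw [if_neg hx, ih m 0 le_rfl (by omega)]
      simp only [G]
      rw [if_neg hx, ← max_assoc, max_eq_left h]

theorem A_eq_G (results : List Int) (value : Int) :
    max_consecutive_count results value = G value 0 results := by
  have h := loopA_eq_G value results 0 0 le_rfl le_rfl
  have hge := G_ge value results 0
  unfold max_consecutive_count
  rw [show (results.foldl (fun (st : Int × Int) result =>
        if result = value then (max st.1 (st.2 + 1), st.2 + 1) else (st.1, 0)) (0, 0))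
      = loopA value results (0, 0) from rfl, h]
  omega

theorem sepI_cons (value s x : Int) (xs : List Int) :
    sepI value s (x :: xs) = (if x ≠ value then [s] else []) ++ sepI value (s + 1) xs := by
  by_cases hx : x = value <;>
    simp [sepI, PySem.List.enumerate_cons, hx]

theorem sepI_shift (value : Int) (xs : List Int) :
    ∀ s, sepI value (s + 1) xs = (sepI value s xs).map (· + 1) := by
  induction xs with
  | nil => intro s; simp [sepI, PySem.List.enumerate_nil]
  | cons x xs ih =>
    intro s
    rw [sepI_cons, sepI_cons, ih (s + 1), List.map_append]
    by_cases hx : x = value <;> simp [hx]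

theorem dm_shift (t : List Int) : ∀ a, dm (a + 1) (t.map (· + 1)) = dm a t := by
  induction t with
  | nil => intro a; simp [dm]
  | cons b r ih =>
    intro a
    cases r with
    | nil => simp [dm]
    | cons c rest =>
      simp only [List.map_cons, dm]
      rw [show (b + 1 : Int) - (a + 1) - 1 = b - a - 1 by ring]
      have := ih b
      simp only [List.map_cons] at this
      rw [this]

theorem dm_cons_of_ne (a z : Int) (t : List Int) (h : t ≠ []) :
    dm a (z :: t) = max (z - a - 1) (dm z t) := by
  cases t with
  | nil => exact absurd rfl h
  | cons b r => simp [dm]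

theorem dm_eq_G (value : Int) (xs : List Int) :
    ∀ c, dm (-1 - c) (sepI value 0 xs ++ [(xs.length : Int)]) = G value c xs := by
  induction xs with
  | nil =>
    intro c
    simp only [sepI, PySem.List.enumerate_nil, List.filterMap_nil, List.nil_append,
      List.length_nil, Int.natCast_zero, G, dm]
    ring
  | cons x xs ih =>
    intro c
    have hlen : ((x :: xs).length : Int) = (xs.length : Int) + 1 := by
      simp [List.length_cons]
    rw [sepI_cons, sepI_shift, hlen]
    by_cases hx : x = value
    · simp only [hx, ne_eq, not_true_eq_false, if_false, List.nil_append]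
      rw [show ((sepI value 0 xs).map (· + 1) ++ [(xs.length : Int) + 1])
            = (sepI value 0 xs ++ [(xs.length : Int)]).map (· + 1) by
          simp [List.map_append]]
      rw [show (-1 - c : Int) = (-1 - (c + 1)) + 1 by ring, dm_shift]
      simpa [G] using ih (c + 1)
    · simp only [ne_eq, hx, not_false_eq_true, if_true]
      rw [show ([(0 : Int)] ++ (sepI value 0 xs).map (· + 1) ++ [(xs.length : Int) + 1])
            = 0 :: ((sepI value 0 xs ++ [(xs.length : Int)]).map (· + 1)) by
          simp [List.map_append]]
      have hne : (sepI value 0 xs ++ [(xs.length : Int)]).map (· + 1) ≠ [] := by simp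
      rw [dm_cons_of_ne _ _ _ hne]
      have hsh := dm_shift (sepI value 0 xs ++ [(xs.length : Int)]) (-1)
      rw [show ((-1 : Int) + 1) = 0 from by ring] at hsh
      have h0 := ih 0
      rw [show (-1 - 0 : Int) = -1 by ring] at h0
      rw [hsh, h0]
      simp only [G]
      rw [if_neg hx]
      omega

-- pulling a max out of a max-fold
theorem foldl_max_out (r : List Int) : ∀ x y, r.foldl max (max x y) = max x (r.foldl max y) := by
  induction r with
  | nil => intro x y; rfl
  | cons b r ih =>
    intro x y
    simp only [List.foldl_cons, max_assoc]
    exact ih x (max y b)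

-- the port's inline zip/map/match computation equals dm
theorem port_dm (t : List Int) : ∀ a, t ≠ [] →
    (match ((a :: t).zip t).map (fun ab => ab.2 - ab.1 - 1) with
      | [] => (0 : Int)
      | d :: r => r.foldl max d) = dm a t := by
  induction t with
  | nil => intro a h; exact absurd rfl h
  | cons b r ih =>
    intro a _
    cases r with
    | nil => simp [dm]
    | cons c rest =>
      have hrec := ih b (by simp)
      simp only [List.zip_cons_cons, List.map_cons, List.foldl_cons] at hrec ⊢
      rw [foldl_max_out, hrec]
      simp [dm]

theorem alt_eq_G (results : List Int) (value : Int) :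
    max_consecutive_count_alt results value = G value 0 results := by
  have hT : sepI value 0 results ++ [(results.length : Int)] ≠ [] := by simp
  have h1 := port_dm (sepI value 0 results ++ [(results.length : Int)]) (-1) hT
  have h2 := dm_eq_G value results 0
  rw [show (-1 - 0 : Int) = -1 by ring] at h2
  rw [show max_consecutive_count_alt results value
        = (match (((-1 : Int) :: (sepI value 0 results ++ [(results.length : Int)])).zip
              (sepI value 0 results ++ [(results.length : Int)])).map
              (fun ab => ab.2 - ab.1 - 1) with
            | [] => (0 : Int)
            | d :: t => t.foldl max d) from rfl]
  rw [h1, h2]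

-- ===== VERDICT (by name: the statement is the Claim_ definition above) =====
theorem max_consecutive_count_spec : Claim_equal_max_consecutive_count := by
  intro results value _
  unfold Spec_max_consecutive_count
  rw [A_eq_G, alt_eq_G]
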